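-- pv_equiv track=rewrite | github.com/jdvelasq/techminer2 | docsrc/build_sphinx_docs.py | generate_index_mapping
-- ===== SOURCE A (Python) =====
-- def generate_index_mapping(files):
--     files = [file for file in files if not file.endswith("__init__.py")]
--     mapping = {}
--     for file in files:
--         parts = file.split("/")
--         path = ".".join(parts[:-1])
--         filename = parts[-1]
--         if path not in mapping:
--             mapping[path] = []
--         mapping[path].append(filename)
--     return mapping
-- ===== SOURCE B (Python) =====
-- def generate_index_mapping(files):
--     parts_list = [f.split("/") for f in files if not f.endswith("__init__.py")]
--     pairs = [(".".join(p[:-1]), p[-1]) for p in parts_list]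
--     return {path: [name for q, name in pairs if q == path] for path, _ in pairs}
-- ===== Notes on version B (the rewrite author's own statement) =====
-- stated objective: simpler
-- what changed: Replaces the imperative loop that mutates a dict (conditional key creation + in-place append) by two list comprehensions plus one dict comprehension that builds each group in full by scanning the pair list per key.
import Mathlib
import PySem

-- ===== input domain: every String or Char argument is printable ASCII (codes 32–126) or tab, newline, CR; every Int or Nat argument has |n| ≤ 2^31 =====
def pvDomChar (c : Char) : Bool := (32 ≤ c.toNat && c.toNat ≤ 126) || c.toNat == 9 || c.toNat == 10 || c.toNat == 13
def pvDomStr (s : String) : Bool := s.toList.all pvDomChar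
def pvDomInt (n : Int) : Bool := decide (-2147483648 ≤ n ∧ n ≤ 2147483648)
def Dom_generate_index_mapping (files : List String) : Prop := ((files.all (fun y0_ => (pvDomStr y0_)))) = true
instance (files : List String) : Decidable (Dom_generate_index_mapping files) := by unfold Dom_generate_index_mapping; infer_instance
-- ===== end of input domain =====

-- B replaces A's imperative dict-mutation loop (conditional key creation + in-place append) by
-- comprehensions: it builds the (path, filename) pair list once and forms each group in full by
-- scanning that list per key inside a dict comprehension (objective: simpler).

-- ===== PORT A =====
-- str.split("/") with a nonempty separator never fails and never returns an empty list,
-- so the `.getD []` / `.getD ""` defaults below are never used.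
def generate_index_mapping (files : List String) : List (String × List String) :=
  let files' := files.filter (fun file => !(PySem.Str.endswith file "__init__.py"))
  (files'.foldl (fun mapping file =>
      let parts := (PySem.Str.split? file "/").getD []
      let path := PySem.Str.join "." (PySem.List.slice parts none (some (-1)))
      let filename := (PySem.List.pyGet? parts (-1)).getD ""
      let m1 := if mapping.contains path then mapping else mapping.insert path ([] : List String)
      m1.modify path [] (fun l => l ++ [filename]))
    PySem.Dict.empty).items

-- ===== PORT B =====
def generate_index_mapping_alt (files : List String) : List (String × List String) :=
  let parts_list := (files.filter (fun f => !(PySem.Str.endswith f "__init__.py"))).map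
      (fun f => (PySem.Str.split? f "/").getD [])
  let pairs := parts_list.map (fun p =>
      (PySem.Str.join "." (PySem.List.slice p none (some (-1))), (PySem.List.pyGet? p (-1)).getD ""))
  (pairs.foldl (fun d pr =>
      d.insert pr.1 ((pairs.filter (fun q => q.1 == pr.1)).map (fun q => q.2)))
    PySem.Dict.empty).items

-- ===== PRECONDITION & SPEC =====
def Spec_generate_index_mapping (files : List String) (out : List (String × List String)) : Prop := out = generate_index_mapping_alt files
instance (files : List String) (out : List (String × List String)) : Decidable (Spec_generate_index_mapping files out) := by unfold Spec_generate_index_mapping; infer_instance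

-- ===== CLAIM (what is proved, stated in full; the proofs are below) =====
def Claim_equal_generate_index_mapping : Prop := ∀ (files : List String), Dom_generate_index_mapping files → Spec_generate_index_mapping files (generate_index_mapping files)

-- ===== LEMMAS AND PROOFS =====

-- file → its parts, parts → the (path, filename) pair, and the pair list of a whole input
def pvSplit (f : String) : List String := (PySem.Str.split? f "/").getD []

def pvMk (p : List String) : String × String :=
  (PySem.Str.join "." (PySem.List.slice p none (some (-1))), (PySem.List.pyGet? p (-1)).getD "")

def pvPairs (files : List String) : List (String × String) :=
  ((files.filter (fun f => !(PySem.Str.endswith f "__init__.py"))).map pvSplit).map pvMk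

-- the full group of filenames a key c receives from a pair list
def pvGroup (L : List (String × String)) (c : String) : List String :=
  (L.filter (fun q => q.1 == c)).map (fun q => q.2)

-- A's loop body, written via pvMk/pvSplit (definitionally A's body)
def pvBodyA (m : PySem.Dict String (List String)) (f : String) : PySem.Dict String (List String) :=
  (if m.contains (pvMk (pvSplit f)).1 then m else m.insert (pvMk (pvSplit f)).1 ([] : List String)).modify
    (pvMk (pvSplit f)).1 [] (fun l => l ++ [(pvMk (pvSplit f)).2])

-- A's loop body: the conditional key-creation followed by modify is just modify
theorem pvStepA_eq (m : PySem.Dict String (List String)) (p n : String) :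
    (if m.contains p then m else m.insert p ([] : List String)).modify p [] (fun l => l ++ [n])
      = m.modify p [] (fun l => l ++ [n]) := by
  by_cases h : m.contains p = true
  · simp [h]
  · have hc : m.contains p = false := by simpa using h
    simp only [hc, Bool.false_eq_true, if_false, PySem.Dict.modify,
      PySem.Dict.getD_insert_self, PySem.Dict.insert_insert_self,
      PySem.Dict.getD_of_not_contains m [] hc]

theorem pvA_items (files : List String) :
    generate_index_mapping files
      = ((files.filter (fun f => !(PySem.Str.endswith f "__init__.py"))).foldl pvBodyA
          PySem.Dict.empty).items := rfl

theorem pvFoldA (l : List String) :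
    ∀ (d : PySem.Dict String (List String)),
      l.foldl pvBodyA d
        = ((l.map pvSplit).map pvMk).foldl
            (fun d pr => d.modify pr.1 [] (fun s => s ++ [pr.2])) d := by
  induction l with
  | nil => intro d; rfl
  | cons f t ih =>
    intro d
    simp only [List.foldl_cons, List.map_cons]
    rw [show pvBodyA d f
        = d.modify (pvMk (pvSplit f)).1 [] (fun s => s ++ [(pvMk (pvSplit f)).2]) from
      pvStepA_eq d _ _]
    exact ih _

theorem pvA_fold (files : List String) :
    generate_index_mapping files
      = ((pvPairs files).foldl (fun d pr => d.modify pr.1 [] (fun s => s ++ [pr.2]))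
          PySem.Dict.empty).items := by
  rw [pvA_items]
  exact congrArg PySem.Dict.items (pvFoldA _ PySem.Dict.empty)

-- lookups in B's fold: every insert at key c writes the same value V c
theorem pvGetD_foldl_insert_keyfun (V : String → List String) (c : String) (dflt : List String) :
    ∀ (l : List (String × String)) (d : PySem.Dict String (List String)),
      (l.foldl (fun d pr => d.insert pr.1 (V pr.1)) d).getD c dflt
        = if c ∈ l.map Prod.fst then V c else d.getD c dflt := by
  intro l
  induction l with
  | nil => intro d; simp
  | cons p rest ih =>
    intro d
    simp only [List.foldl_cons, ih, List.map_cons, List.mem_cons, PySem.Dict.getD_insert]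
    by_cases h1 : c ∈ rest.map Prod.fst <;> by_cases h2 : c = p.1 <;> simp [h1, h2]

-- both items lists equal the canonical  keys.map (k ↦ (k, full group of k))
theorem pvA_canon (files : List String) :
    generate_index_mapping files
      = (PySem.Set.update ([] : PySem.Set String) ((pvPairs files).map Prod.fst)).map
          (fun k => (k, pvGroup (pvPairs files) k)) := by
  rw [pvA_fold]
  set L := pvPairs files with hL
  have hnd : ((L.foldl (fun d pr => d.modify pr.1 [] (fun s => s ++ [pr.2]))
      PySem.Dict.empty)).keys.Nodup :=
    PySem.Dict.nodup_keys_foldl_modify_key L Prod.fst []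
      (fun _ pr => fun s => s ++ [pr.2]) PySem.Dict.empty PySem.Dict.nodup_keys_empty
  rw [PySem.Dict.items_eq_map_keys _ hnd []]
  have hkeys := PySem.Dict.keys_foldl_modify_key L Prod.fst []
    (fun _ pr => fun s => s ++ [pr.2]) PySem.Dict.empty
  rw [PySem.Dict.keys_empty] at hkeys
  rw [hkeys]
  apply List.map_congr_left
  intro k _
  rw [PySem.Dict.getD_foldl_modify_append, PySem.Dict.getD_empty]
  rfl

theorem pvB_items (files : List String) :
    generate_index_mapping_alt files
      = ((pvPairs files).foldl
          (fun d pr => d.insert pr.1 (pvGroup (pvPairs files) pr.1)) PySem.Dict.empty).items := rfl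

theorem pvB_canon (files : List String) :
    generate_index_mapping_alt files
      = (PySem.Set.update ([] : PySem.Set String) ((pvPairs files).map Prod.fst)).map
          (fun k => (k, pvGroup (pvPairs files) k)) := by
  rw [pvB_items]
  set L := pvPairs files with hL
  have hnd : ((L.foldl (fun d pr => d.insert pr.1 (pvGroup L pr.1)) PySem.Dict.empty)).keys.Nodup :=
    PySem.Dict.nodup_keys_foldl_insert_key L Prod.fst
      (fun _ pr => pvGroup L pr.1) PySem.Dict.empty PySem.Dict.nodup_keys_empty
  rw [PySem.Dict.items_eq_map_keys _ hnd []]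
  have hkeys := PySem.Dict.keys_foldl_insert_key L Prod.fst
    (fun _ pr => pvGroup L pr.1) PySem.Dict.empty
  rw [PySem.Dict.keys_empty] at hkeys
  rw [hkeys]
  apply List.map_congr_left
  intro k hk
  have hkmem : k ∈ L.map Prod.fst := by
    rcases (PySem.Set.mem_update _ _ _).mp hk with h | h
    · cases h
    · exact h
  rw [pvGetD_foldl_insert_keyfun (pvGroup L) k [] L PySem.Dict.empty]
  simp [hkmem]

-- ===== VERDICT (by name: the statement is the Claim_ definition above) =====
theorem generate_index_mapping_spec : Claim_equal_generate_index_mapping := by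
  intro files _
  unfold Spec_generate_index_mapping
  rw [pvA_canon, pvB_canon]
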